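-- pv_equiv track=rewrite | github.com/Lanzoor/aoc-2025 | puzzle_6-1.py | solve_math_homework
-- ===== SOURCE A (Python) =====
-- from functools import reduce
--
-- def solve_math_homework(question_input: str) -> int:
--     lines = question_input.splitlines()
--
--     numbers: list[list[int]] = [[int(i) for i in row.split()] for row in lines[:-1]]
--
--     operators = [c for c in lines[-1] if c in '+*']
--
--     total = 0
--     for index, operator in enumerate(operators):
--         column = [row[index] for row in numbers]
--         if operator == "+":
--             total += sum(column)
--         elif operator == "*":
--             total += reduce(lambda x, y: x * y, column)
--
--     return total
-- ===== SOURCE B (Python) =====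
-- def solve_math_homework(question_input: str) -> int:
--     lines = question_input.splitlines()
--     ops = [c for c in lines[-1] if c in '+*']
--     # one accumulator per column: 0 for '+', None = "no factor seen yet" for '*'
--     acc = [0 if op == '+' else None for op in ops]
--     for line in lines[:-1]:
--         row = [int(t) for t in line.split()]
--         acc = [a + v if op == '+' else (v if a is None else a * v)
--                for op, a, v in zip(ops, acc, row)]
--     return sum(acc)
-- ===== Notes on version B (the rewrite author's own statement) =====
-- stated objective: alternative
-- what changed: Single row-major pass keeping one accumulator per operator column (zip of ops/accumulators/row), instead of extracting each column with an inner scan over all rows per operator.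
import Mathlib
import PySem

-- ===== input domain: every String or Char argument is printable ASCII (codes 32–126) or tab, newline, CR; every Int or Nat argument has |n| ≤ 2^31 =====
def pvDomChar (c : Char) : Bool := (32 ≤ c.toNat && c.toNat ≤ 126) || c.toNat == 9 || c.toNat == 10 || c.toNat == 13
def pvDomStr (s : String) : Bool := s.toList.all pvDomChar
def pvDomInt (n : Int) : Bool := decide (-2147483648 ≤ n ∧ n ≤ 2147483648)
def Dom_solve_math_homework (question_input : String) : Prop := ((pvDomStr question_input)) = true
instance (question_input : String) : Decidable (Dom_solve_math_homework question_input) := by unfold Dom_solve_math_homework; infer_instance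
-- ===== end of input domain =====

-- B re-implements A as a single row-major pass with one accumulator per operator column
-- (same value wherever A returns; Pre_ excludes exactly the inputs on which A raises).

-- shared by both ports: '[int(i) for i in row.split()]' (identical comprehension in A and B)
def pvParseRow (line : String) : List Int :=
  (PySem.Str.split₀ line).map (fun t => (PySem.Int.ofStr? t).getD 0)  -- ValueError (none) excluded by Pre_

-- ===== PORT A =====
def solve_math_homework (question_input : String) : Int :=
  let lines := PySem.Str.splitlines question_input
  let numbers : List (List Int) := (PySem.List.slice lines none (some (-1))).map pvParseRow
  let operators : List Char :=
    ((PySem.List.pyGet? lines (-1)).getD "").toList.filter (fun c => c == '+' || c == '*')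
    -- lines[-1]: IndexError on empty input excluded by Pre_
  (PySem.List.enumerate operators).foldl
    (fun total p =>
      let column := numbers.map (fun row => PySem.List.pyGetD row p.1 0)  -- IndexError excluded by Pre_
      if p.2 = '+' then total + column.sum
      else if p.2 = '*' then
        total + (match column with
                 | [] => 0              -- reduce([]) raises TypeError in Python: excluded by Pre_
                 | h :: t => t.foldl (· * ·) h)
      else total) 0

-- ===== PORT B =====
-- one cell update: 'a + v if op == '+' else (v if a is None else a * v)'
def pvUpd (op : Char) (a : Option Int) (v : Int) : Option Int :=
  if op = '+' then some (a.getD 0 + v)   -- a '+' accumulator is always an int (getD 0 never fires under Pre_)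
  else match a with
       | none => some v
       | some x => some (x * v)

-- '[... for op, a, v in zip(ops, acc, row)]'
def pvZipStep (ops : List Char) (acc : List (Option Int)) (row : List Int) : List (Option Int) :=
  (ops.zip (acc.zip row)).map (fun p => pvUpd p.1 p.2.1 p.2.2)

def pvRowStep (ops : List Char) (acc : List (Option Int)) (line : String) : List (Option Int) :=
  pvZipStep ops acc (pvParseRow line)

def solve_math_homework_alt (question_input : String) : Int :=
  let lines := PySem.Str.splitlines question_input
  let ops : List Char :=
    ((PySem.List.pyGet? lines (-1)).getD "").toList.filter (fun c => c == '+' || c == '*')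
  let acc0 : List (Option Int) := ops.map (fun op => if op = '+' then some (0 : Int) else none)
  let acc := (PySem.List.slice lines none (some (-1))).foldl (pvRowStep ops) acc0
  acc.foldl (fun s a => s + a.getD 0) 0
  -- sum(acc): a leftover None ('*' column with no rows) raises TypeError in Python, excluded by Pre_

-- ===== PRECONDITION & SPEC =====
-- Pre_ holds exactly where the Python A returns normally: the input has at least one line
-- (lines[-1] IndexError), every token of the number rows parses as an int (ValueError),
-- every number row is at least as long as the operator list (IndexError), and a '*' operator
-- requires at least one number row (reduce([]) TypeError).
def Pre_solve_math_homework (question_input : String) : Prop :=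
  let lines := PySem.Str.splitlines question_input
  let ops : List Char := (lines.getLast?.getD "").toList.filter (fun c => c == '+' || c == '*')
  lines ≠ [] ∧
  (∀ line ∈ lines.dropLast, ∀ t ∈ PySem.Str.split₀ line, (PySem.Int.ofStr? t).isSome) ∧
  (∀ line ∈ lines.dropLast, ops.length ≤ (PySem.Str.split₀ line).length) ∧
  ('*' ∈ ops → lines.dropLast ≠ [])
instance (question_input : String) : Decidable (Pre_solve_math_homework question_input) := by
  unfold Pre_solve_math_homework; infer_instance

def pvWitness_solve_math_homework : String := "1 2\n3 4\n+*"

def Spec_solve_math_homework (question_input : String) (out : Int) : Prop := out = solve_math_homework_alt question_input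
instance (question_input : String) (out : Int) : Decidable (Spec_solve_math_homework question_input out) := by unfold Spec_solve_math_homework; infer_instance

-- ===== CLAIM (what is proved, stated in full; the proofs are below) =====
def Claim_equal_solve_math_homework : Prop := ∀ (question_input : String), Dom_solve_math_homework question_input → Pre_solve_math_homework question_input → Spec_solve_math_homework question_input (solve_math_homework question_input)

-- ===== LEMMAS AND PROOFS =====

-- per-column value as A computes it
def pvColval (op : Char) (col : List Int) : Int :=
  if op = '+' then col.sum
  else if op = '*' then (match col with | [] => 0 | h :: t => t.foldl (· * ·) h)
  else 0

-- column-recursive reference value both ports are reduced to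
def pvAsum : List Char → List (List Int) → Int
  | [], _ => 0
  | op :: ops, rows =>
      pvColval op (rows.map (fun r => r.headD 0)) + pvAsum ops (rows.map List.tail)

lemma pvGetD_headD_drop (r : List Int) (s : Nat) :
    PySem.List.pyGetD r (s : Int) 0 = (r.drop s).headD 0 := by
  simp [PySem.List.pyGetD_natCast, List.getD_eq_getElem?_getD, List.head?_drop]

lemma pvA_fold (ops : List Char) (rows : List (List Int)) :
    ∀ (s : Nat) (t : Int),
    (PySem.List.enumerate ops (s : Int)).foldl
      (fun total p =>
        let column := rows.map (fun row => PySem.List.pyGetD row p.1 0)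
        if p.2 = '+' then total + column.sum
        else if p.2 = '*' then
          total + (match column with | [] => 0 | h :: t => t.foldl (· * ·) h)
        else total) t
    = t + pvAsum ops (rows.map (List.drop s)) := by
  induction ops with
  | nil => intro s t; simp [PySem.List.enumerate, pvAsum]
  | cons op ops ih =>
    intro s t
    rw [PySem.List.enumerate_cons]
    have hc : ((s : Int) + 1) = ((s + 1 : Nat) : Int) := by push_cast; ring
    rw [List.foldl_cons, hc, ih (s + 1)]
    have hcol : rows.map (fun row => PySem.List.pyGetD row (s : Int) 0)
        = (rows.map (List.drop s)).map (fun r => r.headD 0) := by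
      simp only [List.map_map]
      exact List.map_congr_left (fun r _ => pvGetD_headD_drop r s)
    have htail : rows.map (List.drop (s + 1)) = (rows.map (List.drop s)).map List.tail := by
      simp [List.map_map, Function.comp, List.tail_drop]
    simp only [pvAsum, hcol, htail, pvColval]
    split_ifs <;> ring

lemma pvZip_nil (rows : List (List Int)) :
    rows.foldl (pvZipStep []) [] = [] := by
  induction rows with
  | nil => rfl
  | cons r rows ih => simpa [pvZipStep] using ih

lemma pvB_decomp (op : Char) (ops : List Char) :
    ∀ (rows : List (List Int)) (a : Option Int) (acc : List (Option Int)),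
    (∀ r ∈ rows, r ≠ []) →
    rows.foldl (pvZipStep (op :: ops)) (a :: acc)
    = (rows.foldl (fun x r => pvUpd op x (r.headD 0)) a)
      :: ((rows.map List.tail).foldl (pvZipStep ops) acc) := by
  intro rows
  induction rows with
  | nil => intro a acc _; rfl
  | cons r rows ih =>
    intro a acc h
    obtain ⟨v, rt, rfl⟩ : ∃ v rt, r = v :: rt := by
      cases r with
      | nil => exact absurd rfl (h _ (by simp))
      | cons v rt => exact ⟨v, rt, rfl⟩
    have hstep : pvZipStep (op :: ops) (a :: acc) (v :: rt)
        = pvUpd op a v :: pvZipStep ops acc rt := by simp [pvZipStep]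
    simp only [List.foldl_cons, hstep, List.map_cons, List.headD, List.tail]
    exact ih _ _ (fun r hr => h r (by simp [hr]))

lemma pvPlus_fold (rows : List (List Int)) :
    ∀ (t : Int),
    rows.foldl (fun x r => pvUpd '+' x (r.headD 0)) (some t)
    = some (t + (rows.map (fun r => r.headD 0)).sum) := by
  induction rows with
  | nil => intro t; simp
  | cons r rows ih =>
    intro t
    rw [List.foldl_cons]
    have h1 : pvUpd '+' (some t) (r.headD 0) = some (t + r.headD 0) := by simp [pvUpd]
    rw [h1, ih]
    simp [List.map_cons, List.sum_cons]; ring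

lemma pvMul_fold_some (rows : List (List Int)) :
    ∀ (x : Int),
    rows.foldl (fun a r => pvUpd '*' a (r.headD 0)) (some x)
    = some ((rows.map (fun r => r.headD 0)).foldl (· * ·) x) := by
  induction rows with
  | nil => intro x; simp
  | cons r rows ih =>
    intro x
    rw [List.foldl_cons]
    have h1 : pvUpd '*' (some x) (r.headD 0) = some (x * r.headD 0) := by
      simp [pvUpd]
    rw [h1, ih]
    simp

lemma pvSumOpt : ∀ (l : List (Option Int)) (t : Int),
    l.foldl (fun s a => s + a.getD 0) t = t + (l.map (fun a => a.getD 0)).sum := by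
  intro l
  induction l with
  | nil => intro t; simp
  | cons a l ih =>
    intro t
    rw [List.foldl_cons, List.map_cons, List.sum_cons, ih]
    ring

lemma pvB_main (ops : List Char) :
    ∀ (rows : List (List Int)),
    (∀ c ∈ ops, c = '+' ∨ c = '*') →
    (∀ r ∈ rows, ops.length ≤ r.length) →
    ((rows.foldl (pvZipStep ops)
        (ops.map (fun op => if op = '+' then some (0 : Int) else none))).map
      (fun a => a.getD 0)).sum = pvAsum ops rows := by
  induction ops with
  | nil => intro rows _ _; simp [pvZip_nil, pvAsum]
  | cons op ops ih =>
    intro rows hops hlen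
    have hne : ∀ r ∈ rows, r ≠ [] := by
      intro r hr h
      have := hlen r hr
      simp [h] at this
    rw [List.map_cons, pvB_decomp op ops rows _ _ hne]
    have htl : ((rows.map List.tail).map (fun a => a.headD 0)) = (rows.map List.tail).map (fun a => a.headD 0) := rfl
    have ihr := ih (rows.map List.tail)
      (fun c hc => hops c (by simp [hc]))
      (by intro r hr
          obtain ⟨r0, hr0, rfl⟩ := List.mem_map.mp hr
          have := hlen r0 hr0
          cases r0 <;> simp_all)
    rw [List.map_cons, List.sum_cons, ihr]
    have hhead : (rows.foldl (fun x r => pvUpd op x (r.headD 0))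
        (if op = '+' then some (0 : Int) else none)).getD 0
        = pvColval op (rows.map (fun r => r.headD 0)) := by
      rcases hops op (by simp) with h | h <;> subst h
      · rw [if_pos rfl, pvPlus_fold]
        simp [pvColval]
      · rw [if_neg (by decide)]
        cases rows with
        | nil => simp [pvColval]
        | cons r rows =>
          rw [List.foldl_cons]
          have h0 : pvUpd '*' none (r.headD 0) = some (r.headD 0) := by simp [pvUpd]
          rw [h0, pvMul_fold_some]
          simp [pvColval]
    rw [hhead, pvAsum]

-- ===== VERDICT (by name: the statement is the Claim_ definition above) =====
theorem solve_math_homework_spec : Claim_equal_solve_math_homework := by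
  intro q _ hpre
  unfold Spec_solve_math_homework
  simp only [solve_math_homework, solve_math_homework_alt]
  obtain ⟨hne, -, hlen, -⟩ := hpre
  set lines := PySem.Str.splitlines q with hlines
  set ops : List Char :=
    ((PySem.List.pyGet? lines (-1)).getD "").toList.filter (fun c => c == '+' || c == '*')
    with hops
  have hops' : ops = (lines.getLast?.getD "").toList.filter (fun c => c == '+' || c == '*') := by
    rw [hops, PySem.List.pyGet?_neg_one]
  have hpm : ∀ c ∈ ops, c = '+' ∨ c = '*' := by
    intro c hc
    rcases List.mem_filter.mp hc with ⟨-, h⟩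
    rcases Bool.or_eq_true_iff.mp h with h | h
    · exact Or.inl (by simpa using h)
    · exact Or.inr (by simpa using h)
  have hslice : PySem.List.slice lines none (some (-1)) = lines.dropLast :=
    PySem.List.slice_to_neg_one lines
  have hrows : ∀ r ∈ lines.dropLast.map pvParseRow, ops.length ≤ r.length := by
    intro r hr
    obtain ⟨l, hl, rfl⟩ := List.mem_map.mp hr
    have := hlen l hl
    rw [hops']
    simpa [pvParseRow] using this
  -- B side: fold over lines = fold over parsed rows
  have hBfold : lines.dropLast.foldl (pvRowStep ops)
        (ops.map (fun op => if op = '+' then some (0 : Int) else none))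
      = (lines.dropLast.map pvParseRow).foldl (pvZipStep ops)
        (ops.map (fun op => if op = '+' then some (0 : Int) else none)) := by
    rw [List.foldl_map]; rfl
  have hB : ((lines.dropLast.map pvParseRow).foldl (pvZipStep ops)
        (ops.map (fun op => if op = '+' then some (0 : Int) else none))).foldl
        (fun s a => s + a.getD 0) 0
      = pvAsum ops (lines.dropLast.map pvParseRow) := by
    rw [pvSumOpt]
    rw [← hops'] at hlen
    simpa using pvB_main ops (lines.dropLast.map pvParseRow) hpm hrows
  -- A side
  have hA := pvA_fold ops (lines.dropLast.map pvParseRow) 0 0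
  have hdrop : (lines.dropLast.map pvParseRow).map (List.drop 0)
      = lines.dropLast.map pvParseRow :=
    (List.map_congr_left (fun r _ => List.drop_zero)).trans (List.map_id _)
  simp only [Nat.cast_zero, zero_add, hdrop] at hA
  rw [hslice, hBfold, hB, ← hA]
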